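-- pv_equiv track=rewrite | github.com/lipengyuer/DataScience | src/learning/postag/wordseg/corpusProcess.py | character_tagging
-- ===== SOURCE A (Python) =====
-- def character_tagging(line):
--     res = ""
--     word_list = line.strip().split()
--     for word in word_list:
--         if len(word) == 1:
--             res += word + "\tS\n"
--         else:
--             res += word[0] + "\tB\n"
--             for w in word[1:len(word)-1]:
--                 res += w + "\tM\n"
--             res += word[len(word)-1] + "\tE\n"
--     res += "\n"
--     return res
-- ===== SOURCE B (Python) =====
-- def character_tagging(line):
--     # Sliding-window scan: pad with spaces and classify each character by its
--     # two neighbours (no splitting into words at all).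
--     s = " " + line.strip() + " "
--     res = []
--     for (prev, c), nxt in zip(zip(s, s[1:]), s[2:]):
--         if c.isspace():
--             continue
--         if prev.isspace() and nxt.isspace():
--             tag = "S"
--         elif prev.isspace():
--             tag = "B"
--         elif nxt.isspace():
--             tag = "E"
--         else:
--             tag = "M"
--         res.append(c + "\t" + tag + "\n")
--     res.append("\n")
--     return "".join(res)
-- ===== Notes on version B (the rewrite author's own statement) =====
-- stated objective: alternative
-- what changed: B never splits the line into words: it pads the stripped line with spaces and makes one sliding-window pass over character triples (prev, c, next), tagging each non-space character S/B/E/M purely from whether its neighbours are whitespace, then joins the collected pieces once.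
import Mathlib
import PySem

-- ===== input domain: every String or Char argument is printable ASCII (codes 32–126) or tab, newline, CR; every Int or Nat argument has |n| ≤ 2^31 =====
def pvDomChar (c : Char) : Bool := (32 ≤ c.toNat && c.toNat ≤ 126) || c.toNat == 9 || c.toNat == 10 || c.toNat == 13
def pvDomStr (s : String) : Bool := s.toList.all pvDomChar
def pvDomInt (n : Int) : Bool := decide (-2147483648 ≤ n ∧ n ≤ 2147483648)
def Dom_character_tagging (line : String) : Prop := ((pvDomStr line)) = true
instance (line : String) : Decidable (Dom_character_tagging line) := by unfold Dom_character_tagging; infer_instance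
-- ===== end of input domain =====

-- B replaces A's split-into-words + three-branch per-word emission with a word-free
-- sliding-window pass over (prev, c, next) character triples of the space-padded line
-- (objective: alternative — a different algorithm with the same cost).

-- ===== PORT A =====
-- word[0] and word[len(word)-1] never raise in Python: split() yields only nonempty
-- words, so the .getD ' ' defaults are never taken.
def character_tagging (line : String) : String :=
  let word_list := PySem.Chars.split₀ (PySem.Chars.strip line.toList)
  let res := word_list.foldl (fun res word =>
    if word.length == 1 then
      res ++ word ++ ['\t', 'S', '\n']
    else
      let res1 := res ++ [(PySem.List.pyGet? word 0).getD ' '] ++ ['\t', 'B', '\n']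
      let res2 := (PySem.List.slice word (some 1) (some ((word.length : Int) - 1))).foldl
        (fun r w => r ++ [w] ++ ['\t', 'M', '\n']) res1
      res2 ++ [(PySem.List.pyGet? word ((word.length : Int) - 1)).getD ' '] ++ ['\t', 'E', '\n']) []
  String.mk (res ++ ['\n'])

-- ===== PORT B =====
def character_tagging_alt (line : String) : String :=
  let s := [' '] ++ PySem.Chars.strip line.toList ++ [' ']
  let res := ((s.zip (PySem.List.slice s (some 1))).zip (PySem.List.slice s (some 2))).foldl
    (fun res tr =>
      if PySem.Chars.isspace tr.1.2 then res
      else res ++ [[tr.1.2, '\t',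
        (if PySem.Chars.isspace tr.1.1 && PySem.Chars.isspace tr.2 then 'S'
         else if PySem.Chars.isspace tr.1.1 then 'B'
         else if PySem.Chars.isspace tr.2 then 'E' else 'M'), '\n']]) ([] : List (List Char))
  String.mk (PySem.Chars.join [] (res ++ [['\n']]))

-- ===== PRECONDITION & SPEC =====
def Spec_character_tagging (line : String) (out : String) : Prop := out = character_tagging_alt line
instance (line : String) (out : String) : Decidable (Spec_character_tagging line out) := by unfold Spec_character_tagging; infer_instance

-- ===== CLAIM (what is proved, stated in full; the proofs are below) =====
def Claim_equal_character_tagging : Prop := ∀ (line : String), Dom_character_tagging line → Spec_character_tagging line (character_tagging line)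

-- ===== LEMMAS AND PROOFS =====

-- A's per-word contribution
def perA (w : List Char) : List Char :=
  if w.length == 1 then w ++ ['\t', 'S', '\n']
  else
    ([(PySem.List.pyGet? w 0).getD ' '] ++ ['\t', 'B', '\n'])
      ++ (PySem.List.slice w (some 1) (some ((w.length : Int) - 1))).flatMap
            (fun x => [x, '\t', 'M', '\n'])
      ++ ([(PySem.List.pyGet? w ((w.length : Int) - 1)).getD ' '] ++ ['\t', 'E', '\n'])

-- contribution of a still-open word (head tagged B, the rest M so far)
def openOut : List Char → List Char
  | [] => []
  | c :: cs => [c, '\t', 'B', '\n'] ++ cs.flatMap (fun x => [x, '\t', 'M', '\n'])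

def pvTag (lsp rsp : Bool) : Char :=
  if lsp && rsp then 'S' else if lsp then 'B' else if rsp then 'E' else 'M'

def pieceT (tr : (Char × Char) × Char) : List Char :=
  if PySem.Chars.isspace tr.1.2 then []
  else [tr.1.2, '\t', pvTag (PySem.Chars.isspace tr.1.1) (PySem.Chars.isspace tr.2), '\n']

-- B's scan, phrased on the unpadded character list with an in-word flag
def scanB : Bool → List Char → List Char
  | _, [] => []
  | inw, c :: cs =>
      (if PySem.Chars.isspace c then []
       else [c, '\t', pvTag (!inw) (PySem.Chars.isspace (cs.headD ' ')), '\n'])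
        ++ scanB (!PySem.Chars.isspace c) cs

theorem stepA (acc w : List Char) :
    (if w.length == 1 then
      acc ++ w ++ ['\t', 'S', '\n']
    else
      let res1 := acc ++ [(PySem.List.pyGet? w 0).getD ' '] ++ ['\t', 'B', '\n']
      let res2 := (PySem.List.slice w (some 1) (some ((w.length : Int) - 1))).foldl
        (fun r c => r ++ [c] ++ ['\t', 'M', '\n']) res1
      res2 ++ [(PySem.List.pyGet? w ((w.length : Int) - 1)).getD ' '] ++ ['\t', 'E', '\n'])
      = acc ++ perA w := by
  unfold perA
  split
  · simp
  · have h : ∀ (init : List Char),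
        (PySem.List.slice w (some 1) (some ((w.length : Int) - 1))).foldl
          (fun r c => r ++ [c] ++ ['\t', 'M', '\n']) init
          = init ++ (PySem.List.slice w (some 1) (some ((w.length : Int) - 1))).flatMap
              (fun x => [x, '\t', 'M', '\n']) := by
      intro init
      have := PySem.List.foldl_append_eq_flatMap (fun x => [x, '\t', 'M', '\n'])
        (PySem.List.slice w (some 1) (some ((w.length : Int) - 1))) init
      simpa using this
    simp only [h]
    simp

theorem foldA (ws : List (List Char)) : ∀ (acc : List Char),
    ws.foldl (fun res word =>
      if word.length == 1 then
        res ++ word ++ ['\t', 'S', '\n']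
      else
        let res1 := res ++ [(PySem.List.pyGet? word 0).getD ' '] ++ ['\t', 'B', '\n']
        let res2 := (PySem.List.slice word (some 1) (some ((word.length : Int) - 1))).foldl
          (fun r w => r ++ [w] ++ ['\t', 'M', '\n']) res1
        res2 ++ [(PySem.List.pyGet? word ((word.length : Int) - 1)).getD ' '] ++ ['\t', 'E', '\n']) acc
      = acc ++ ws.flatMap perA := by
  induction ws with
  | nil => intro acc; simp
  | cons w ws ih =>
    intro acc
    simp only [List.foldl_cons]
    rw [stepA, ih, List.flatMap_cons, List.append_assoc]

theorem join_nil_eq_flatten (ps : List (List Char)) : PySem.Chars.join [] ps = ps.flatten := by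
  induction ps with
  | nil => simp [PySem.Chars.join_nil]
  | cons p rest ih =>
    cases rest with
    | nil => simp [PySem.Chars.join_singleton]
    | cons q r => simp [PySem.Chars.join_cons_cons, ih]

theorem flatten_foldB (l : List ((Char × Char) × Char)) : ∀ (acc : List (List Char)),
    (l.foldl (fun res tr =>
      if PySem.Chars.isspace tr.1.2 then res
      else res ++ [[tr.1.2, '\t',
        (if PySem.Chars.isspace tr.1.1 && PySem.Chars.isspace tr.2 then 'S'
         else if PySem.Chars.isspace tr.1.1 then 'B'
         else if PySem.Chars.isspace tr.2 then 'E' else 'M'), '\n']]) acc).flatten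
      = acc.flatten ++ l.flatMap pieceT := by
  induction l with
  | nil => intro acc; simp
  | cons tr l ih =>
    intro acc
    simp only [List.foldl_cons, List.flatMap_cons]
    by_cases h : PySem.Chars.isspace tr.1.2
    · rw [if_pos h, ih]
      simp [pieceT, h]
    · rw [if_neg h, ih]
      simp [pieceT, h, pvTag, List.flatten_append]

-- the triple list of the padded string, unfolded one step
theorem zipT_cons (a b : Char) (r : List Char) (hr : r ≠ []) :
    ((a :: b :: r).zip ((a :: b :: r).drop 1)).zip ((a :: b :: r).drop 2)
      = ((a, b), r.headD ' ') :: (((b :: r).zip ((b :: r).drop 1)).zip ((b :: r).drop 2)) := by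
  cases r with
  | nil => exact absurd rfl hr
  | cons r0 r' => simp [List.zip_cons_cons]

theorem zipT_lemma (t : List Char) : ∀ (prev : Char),
    (((prev :: t ++ [' ']).zip ((prev :: t ++ [' ']).drop 1)).zip
        ((prev :: t ++ [' ']).drop 2)).flatMap pieceT
      = scanB (!PySem.Chars.isspace prev) t := by
  induction t with
  | nil => intro prev; simp [scanB]
  | cons c cs ih =>
    intro prev
    rw [show (prev :: (c :: cs) ++ [' ']) = prev :: c :: (cs ++ [' ']) by simp]
    rw [zipT_cons _ _ _ (by simp)]
    rw [show (cs ++ [' ']).headD ' ' = cs.headD ' ' by cases cs <;> simp]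
    rw [List.flatMap_cons]
    rw [show (c :: (cs ++ [' '])) = (c :: cs) ++ [' '] by simp, ih c]
    simp only [scanB, pieceT]
    by_cases hc : PySem.Chars.isspace c
    · simp [hc]
    · simp only [hc, if_false, Bool.false_eq_true]
      congr 2
      simp [pvTag, Bool.not_not]

theorem openOut_snoc (w : List Char) (hw : w ≠ []) (c : Char) :
    openOut (w ++ [c]) = openOut w ++ [c, '\t', 'M', '\n'] := by
  match w, hw with
  | a :: t, _ => simp [openOut, List.flatMap_append]

theorem perA_single (c : Char) : perA [c] = [c, '\t', 'S', '\n'] := by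
  simp [perA]

theorem perA_snoc (w : List Char) (hw : w ≠ []) (c : Char) :
    perA (w ++ [c]) = openOut w ++ [c, '\t', 'E', '\n'] := by
  match w, hw with
  | a :: t, _ =>
    have hlen : ((a :: t) ++ [c]).length = t.length + 2 := by simp
    have hne : ¬ (((a :: t) ++ [c]).length == 1) = true := by simp
    have hhead : (PySem.List.pyGet? ((a :: t) ++ [c]) 0).getD ' ' = a := by
      have h0 : (0 : Int) = ((0 : Nat) : Int) := by norm_num
      rw [h0, PySem.List.pyGet?_natCast]; simp
    have hlast : (PySem.List.pyGet? ((a :: t) ++ [c]) ((((a :: t) ++ [c]).length : Int) - 1)).getD ' ' = c := by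
      have h2 : ((((a :: t) ++ [c]).length : Int) - 1) = (((t.length + 1 : Nat)) : Int) := by
        rw [hlen]; push_cast; ring
      rw [h2, PySem.List.pyGet?_natCast]
      rw [List.getElem?_eq_getElem (by simp)]
      simp [List.getElem_cons]
    have hslice : PySem.List.slice ((a :: t) ++ [c]) (some 1) (some ((((a :: t) ++ [c]).length : Int) - 1)) = t := by
      have h1 : (1 : Int) = ((1 : Nat) : Int) := by norm_num
      have h2 : ((((a :: t) ++ [c]).length : Int) - 1) = (((t.length + 1 : Nat)) : Int) := by
        rw [hlen]; push_cast; ring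
      rw [h2, h1, PySem.List.slice_natCast]
      simp
    unfold perA
    rw [if_neg hne, hhead, hlast, hslice]
    simp [openOut]

-- the accumulator acc of split₀.go only prepends finished words
theorem go_shape (s : List Char) : ∀ (cur : List Char) (acc : List (List Char)),
    PySem.Chars.split₀.go s cur acc = acc.reverse ++ PySem.Chars.split₀.go s cur [] := by
  induction s with
  | nil =>
    intro cur acc
    simp only [PySem.Chars.split₀.go]
    split <;> simp
  | cons c rest ih =>
    intro cur acc
    simp only [PySem.Chars.split₀.go]
    split
    · split
      · exact ih _ _
      · rw [ih _ (cur.reverse :: acc), ih _ [cur.reverse]]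
        simp
    · exact ih _ _

def emitted (cur s : List Char) : List Char :=
  if cur.isEmpty then []
  else if PySem.Chars.isspace (s.headD ' ') then perA cur.reverse else openOut cur.reverse

-- MAIN invariant: the flattened word output of split equals the window scan
theorem main_inv (s : List Char) : ∀ (cur : List Char),
    (PySem.Chars.split₀.go s cur []).flatMap perA = emitted cur s ++ scanB (!cur.isEmpty) s := by
  induction s with
  | nil =>
    intro cur
    simp only [PySem.Chars.split₀.go, scanB, emitted]
    split
    · rename_i h; simp
    · rename_i h; simp [PySem.Chars.isspace]
  | cons c cs ih =>
    intro cur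
    simp only [PySem.Chars.split₀.go]
    by_cases hc : PySem.Chars.isspace c
    · rw [if_pos hc]
      by_cases hcur : cur.isEmpty
      · rw [if_pos hcur, ih]
        simp [emitted, hcur, scanB, hc]
      · rw [if_neg hcur, go_shape, List.flatMap_append, ih]
        simp [emitted, hcur, scanB, hc]
    · rw [if_neg hc, ih (c :: cur)]
      by_cases hcur : cur.isEmpty
      · have : cur = [] := by simpa [List.isEmpty_iff] using hcur
        subst this
        simp only [emitted, List.isEmpty_cons, List.isEmpty_nil, scanB, hc]
        by_cases hn : PySem.Chars.isspace (cs.head?.getD ' ') <;>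
          simp [hn, perA_single, openOut, pvTag]
      · have hrev : cur.reverse ≠ [] := by
          simpa [List.isEmpty_iff] using hcur
        simp only [emitted, List.isEmpty_cons, hcur, scanB, hc, List.headD_cons,
          Bool.false_eq_true, if_false, List.reverse_cons]
        by_cases hn : PySem.Chars.isspace (cs.headD ' ')
        · rw [if_pos hn, perA_snoc _ hrev]
          have hn' : PySem.Chars.isspace (cs.head?.getD ' ') = true := by
            cases cs <;> simpa using hn
          simp [pvTag, hn']
        · rw [if_neg hn, openOut_snoc _ hrev]
          have hn' : PySem.Chars.isspace (cs.head?.getD ' ') = false := by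
            cases cs <;> simpa using hn
          simp [pvTag, hn']

-- ===== VERDICT (by name: the statement is the Claim_ definition above) =====
theorem character_tagging_spec : Claim_equal_character_tagging := by
  intro line _
  unfold Spec_character_tagging
  show character_tagging line = character_tagging_alt line
  simp only [character_tagging, character_tagging_alt]
  rw [foldA, join_nil_eq_flatten, List.flatten_append]
  rw [PySem.List.slice_from _ (by norm_num : (0:Int) ≤ 1),
      PySem.List.slice_from _ (by norm_num : (0:Int) ≤ 2), flatten_foldB]
  have hz := zipT_lemma (PySem.Chars.strip line.toList) ' '
  have hsp : PySem.Chars.isspace ' ' = true := by decide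
  rw [show ((1:Int).toNat) = 1 from rfl, show ((2:Int).toNat) = 2 from rfl] at *
  have hmain := main_inv (PySem.Chars.strip line.toList) []
  simp only [PySem.Chars.split₀] at hmain ⊢
  rw [hmain]
  simp only [emitted, List.isEmpty_nil, if_true, List.nil_append]
  rw [show ([' '] ++ PySem.Chars.strip line.toList ++ [' ']) = ' ' :: (PySem.Chars.strip line.toList ++ [' ']) by simp] at *
  rw [show (' ' :: (PySem.Chars.strip line.toList ++ [' '])) = (' ' :: PySem.Chars.strip line.toList ++ [' ']) by simp] at *
  rw [hz]
  simp [hsp]
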